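-- pv_equiv track=rewrite | github.com/KCGI-WXS/intro_speech_understanding | 2023_fall/lec03/homework3.py | cancellation
-- ===== SOURCE A (Python) =====
-- def cancellation(input_list, stop_word):
--     new_list = []
--     for i in input_list:
--         if i !=stop_word:
--             new_list.append(i)
--         else:
--             break
--     return new_list
-- ===== SOURCE B (Python) =====
-- def cancellation(input_list, stop_word):
--     try:
--         idx = input_list.index(stop_word)
--     except ValueError:
--         return list(input_list)
--     return list(input_list[:idx])
-- ===== Notes on version B (the rewrite author's own statement) =====
-- stated objective: simpler
-- what changed: Replaces the element-by-element loop with append/break by a single index-find of the stop word followed by one slice (full copy when absent).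
import Mathlib
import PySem

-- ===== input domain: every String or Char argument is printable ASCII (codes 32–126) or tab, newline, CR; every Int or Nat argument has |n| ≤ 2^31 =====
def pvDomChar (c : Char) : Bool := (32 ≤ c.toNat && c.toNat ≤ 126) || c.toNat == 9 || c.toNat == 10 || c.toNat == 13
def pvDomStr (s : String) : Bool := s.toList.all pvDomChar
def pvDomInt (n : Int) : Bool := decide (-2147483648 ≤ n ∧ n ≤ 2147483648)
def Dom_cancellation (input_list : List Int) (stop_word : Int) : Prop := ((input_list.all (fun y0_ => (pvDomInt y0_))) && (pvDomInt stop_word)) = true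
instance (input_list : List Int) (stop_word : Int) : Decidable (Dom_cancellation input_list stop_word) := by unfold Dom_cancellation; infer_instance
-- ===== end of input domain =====

-- B replaces the explicit loop/append/break with index-find + slice; return value only.
-- ===== PORT A =====
def cancAGo (stop_word : Int) (new_list : List Int) : List Int → List Int
  | [] => new_list
  | i :: t => if i ≠ stop_word then cancAGo stop_word (new_list ++ [i]) t else new_list

def cancellation (input_list : List Int) (stop_word : Int) : List Int :=
  cancAGo stop_word [] input_list

-- ===== PORT B =====
def cancellation_alt (input_list : List Int) (stop_word : Int) : List Int :=
  match PySem.List.index? input_list stop_word with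
  | some idx => PySem.List.slice input_list none (some (idx : Int))
  | none => input_list

-- ===== PRECONDITION & SPEC =====
def Spec_cancellation (input_list : List Int) (stop_word : Int) (out : List Int) : Prop := out = cancellation_alt input_list stop_word
instance (input_list : List Int) (stop_word : Int) (out : List Int) : Decidable (Spec_cancellation input_list stop_word out) := by unfold Spec_cancellation; infer_instance

-- ===== CLAIM (what is proved, stated in full; the proofs are below) =====
def Claim_equal_cancellation : Prop := ∀ (input_list : List Int) (stop_word : Int), Dom_cancellation input_list stop_word → Spec_cancellation input_list stop_word (cancellation input_list stop_word)

-- ===== LEMMAS AND PROOFS =====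
lemma cancAGo_eq (stop_word : Int) (l acc : List Int) :
    cancAGo stop_word acc l = acc ++ cancellation_alt l stop_word := by
  induction l generalizing acc with
  | nil => simp [cancAGo, cancellation_alt, PySem.List.index?]
  | cons i t ih =>
    by_cases h : i = stop_word
    · subst h
      unfold cancellation_alt
      rw [PySem.List.index?_cons_self]
      simp [cancAGo, PySem.List.slice_to]
    · rw [show cancAGo stop_word acc (i :: t) = cancAGo stop_word (acc ++ [i]) t from by
        simp [cancAGo, h], ih]
      rw [show cancellation_alt (i :: t) stop_word = i :: cancellation_alt t stop_word from ?_]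
      · simp
      · unfold cancellation_alt
        rw [PySem.List.index?_cons_of_ne (h := h)]
        cases hk : PySem.List.index? t stop_word with
        | none => simp
        | some k =>
          simp only [Option.map_some, PySem.List.slice_to_natCast]
          push_cast
          simp [List.take_succ_cons]

-- ===== VERDICT (by name: the statement is the Claim_ definition above) =====
theorem cancellation_spec : Claim_equal_cancellation := by
  intro l s _
  unfold Spec_cancellation cancellation
  exact cancAGo_eq s l []
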